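-- pv_equiv track=rewrite | github.com/pikzel/PEGJudge | ccc03j2.py | get_smallest_factors
-- ===== SOURCE A (Python) =====
-- def get_smallest_factors(n):
-- 	f1 = f2 = 0
-- 	for i in range(2, int(n / 2 + 1)):
-- 		for j in range(int(n / 2 + 1), 2, -1):
-- 			if i > j: break
-- 			if i * j == n:
-- 				if i-j < f1-f2 or f1 == 0:
-- 					f1 = i
-- 					f2 = j
-- 	return f1, f2
-- ===== SOURCE B (Python) =====
-- def get_smallest_factors(n):
--     d = 2
--     while d * d <= n:
--         if n % d == 0:
--             return d, n // d
--         d += 1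
--     return 0, 0
-- ===== Notes on version B (the rewrite author's own statement) =====
-- stated objective: faster
-- what changed: Replaces A's quadratic nested scan over all pairs up to n/2 with a single trial-division loop up to sqrt(n): the smallest divisor d gives the widest-gap pair (d, n//d).
-- intended difference: On the single input n = 4, A's inner range stops above two so the equal-factor pair is never tested and A returns (0, 0); B returns the intended factor pair (2, 2). — e.g. on get_smallest_factors(4): A returns (0, 0), B returns (2, 2)
import Mathlib
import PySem

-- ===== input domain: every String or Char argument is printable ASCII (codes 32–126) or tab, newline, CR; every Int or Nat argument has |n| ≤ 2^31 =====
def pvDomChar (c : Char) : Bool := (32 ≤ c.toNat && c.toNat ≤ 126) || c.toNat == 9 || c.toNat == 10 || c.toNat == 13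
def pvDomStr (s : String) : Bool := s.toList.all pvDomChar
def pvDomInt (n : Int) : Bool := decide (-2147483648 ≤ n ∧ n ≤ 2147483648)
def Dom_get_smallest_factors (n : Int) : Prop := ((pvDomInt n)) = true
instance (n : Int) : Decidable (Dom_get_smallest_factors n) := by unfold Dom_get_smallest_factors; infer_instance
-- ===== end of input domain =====

-- B replaces A's quadratic nested pair scan by a single trial-division loop up to sqrt(n)
-- (objective: faster); A and B agree everywhere in Dom except n = 4, stated as D_ below.

-- ===== PORT A =====
-- inner `for j in range(int(n/2+1), 2, -1)` loop with its `break`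
def innerA (i n : Int) : List Int → Int × Int → Int × Int
  | [], st => st
  | j :: js, (f1, f2) =>
      if j < i then (f1, f2)                                    -- `if i > j: break`
      else if i * j = n then
        innerA i n js (if i - j < f1 - f2 ∨ f1 = 0 then (i, j) else (f1, f2))
      else innerA i n js (f1, f2)

-- `int(n / 2 + 1)` = trunc((n+2)/2) = (n+2).tdiv 2 : exact, since float arithmetic is
-- exact for |n| ≤ 2^31 and int() truncates toward zero.
def get_smallest_factors (n : Int) : Int × Int :=
  (PySem.List.pyRange 2 (Int.tdiv (n + 2) 2) 1).foldl
    (fun st i => innerA i n (PySem.List.pyRange (Int.tdiv (n + 2) 2) 2 (-1)) st) (0, 0)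

-- ===== PORT B =====
-- `while d * d <= n: ...` trial division; the proof argument only serves termination
def altLoop (n d : Int) (hd : 2 ≤ d) : Int × Int :=
  if h : d * d ≤ n then
    if PySem.Int.mod n d = 0 then (d, PySem.Int.floordiv n d)
    else altLoop n (d + 1) (by omega)
  else (0, 0)
termination_by (n + 1 - d).toNat
decreasing_by
  have h2 : 2 * d ≤ d * d := by nlinarith
  omega

def get_smallest_factors_alt (n : Int) : Int × Int := altLoop n 2 (by norm_num)

-- ===== PRECONDITION & SPEC =====
-- On the single input n = 4, A's inner range stops above two so the equal-factor pair is never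
-- tested and A returns (0, 0); B returns the intended factor pair (2, 2).
def D_get_smallest_factors (n : Int) : Prop := n = 4
instance (n : Int) : Decidable (D_get_smallest_factors n) := by unfold D_get_smallest_factors; infer_instance
def Spec_get_smallest_factors (n : Int) (out : Int × Int) : Prop := ¬ D_get_smallest_factors n → out = get_smallest_factors_alt n
instance (n : Int) (out : Int × Int) : Decidable (Spec_get_smallest_factors n out) := by unfold Spec_get_smallest_factors; infer_instance
def pvDiffWitness_get_smallest_factors : Int := 4
def pvDiffWitnessOut_get_smallest_factors : (Int × Int) × (Int × Int) := ((0, 0), (2, 2))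

-- ===== CLAIM (what is proved, stated in full; the proofs are below) =====
def Claim_unchanged_get_smallest_factors : Prop := ∀ (n : Int), Dom_get_smallest_factors n → Spec_get_smallest_factors n (get_smallest_factors n)
def Claim_changed_get_smallest_factors : Prop := Dom_get_smallest_factors (pvDiffWitness_get_smallest_factors) ∧ D_get_smallest_factors (pvDiffWitness_get_smallest_factors) ∧ get_smallest_factors (pvDiffWitness_get_smallest_factors) = pvDiffWitnessOut_get_smallest_factors.1 ∧ get_smallest_factors_alt (pvDiffWitness_get_smallest_factors) = pvDiffWitnessOut_get_smallest_factors.2 ∧ pvDiffWitnessOut_get_smallest_factors.1 ≠ pvDiffWitnessOut_get_smallest_factors.2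
def Claim_exact_get_smallest_factors : Prop := ∀ (n : Int), Dom_get_smallest_factors n → D_get_smallest_factors n → get_smallest_factors n ≠ get_smallest_factors_alt n

-- ===== LEMMAS AND PROOFS =====

-- least factor of n, as an Int
def pFac (n : Int) : Int := ((Int.toNat n).minFac : Int)

lemma pFac_two_le {n : Int} (hn : 6 ≤ n) : 2 ≤ pFac n := by
  have h1 : n.toNat ≠ 1 := by omega
  unfold pFac
  exact_mod_cast (Nat.minFac_prime h1).two_le

lemma pFac_dvd {n : Int} (hn : 6 ≤ n) : pFac n ∣ n := by
  have h := Nat.minFac_dvd n.toNat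
  have h2 : (((Int.toNat n).minFac : Int)) ∣ ((n.toNat : Nat) : Int) := Int.natCast_dvd_natCast.mpr h
  rwa [Int.toNat_of_nonneg (by omega)] at h2

lemma pFac_min {n : Int} (hn : 6 ≤ n) {e : Int} (he : 2 ≤ e) (hdvd : e ∣ n) : pFac n ≤ e := by
  have he' : e.toNat ∣ n.toNat := by
    have : ((e.toNat : Int)) ∣ ((n.toNat : Int)) := by
      rwa [Int.toNat_of_nonneg (by omega : (0:Int) ≤ e), Int.toNat_of_nonneg (by omega : (0:Int) ≤ n)]
    exact_mod_cast this
  have := Nat.minFac_le_of_dvd (by omega : 2 ≤ e.toNat) he'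
  have : ((Int.toNat n).minFac : Int) ≤ (e.toNat : Int) := by exact_mod_cast this
  rwa [Int.toNat_of_nonneg (by omega : (0:Int) ≤ e)] at this

lemma foldl_fixed {α β : Type} (g : β → α → β) (s : β) :
    ∀ L : List α, (∀ x ∈ L, g s x = s) → L.foldl g s = s := by
  intro L
  induction L with
  | nil => intro _; rfl
  | cons x xs ih =>
      intro h
      simp only [List.foldl_cons, h x (by simp)]
      exact ih (fun y hy => h y (by simp [hy]))

-- characterisation of the inner j-loop over range(hi, 2, -1)
lemma innerA_spec (n i : Int) (_hn : 6 ≤ n) (hi2 : 2 ≤ i) :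
    ∀ hi : Int, 2 ≤ hi → ∀ f1 f2 : Int,
      innerA i n (PySem.List.pyRange hi 2 (-1)) (f1, f2) =
        if i ∣ n ∧ i ≤ n / i ∧ 3 ≤ n / i ∧ n / i ≤ hi ∧ (i - n / i < f1 - f2 ∨ f1 = 0)
        then (i, n / i) else (f1, f2) := by
  intro hi hhi
  induction hi, hhi using Int.le_induction with
  | base =>
      intro f1 f2
      rw [PySem.List.pyRange_neg_one_eq_nil (by norm_num)]
      rw [if_neg (by rintro ⟨_, _, h3, h4, _⟩; omega)]
      rfl
  | succ hi hhi IH =>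
      intro f1 f2
      rw [PySem.List.pyRange_neg_one_cons (by omega : (2:Int) < hi + 1)]
      show innerA i n ((hi+1) :: PySem.List.pyRange (hi+1-1) 2 (-1)) (f1, f2) = _
      rw [show hi + 1 - 1 = hi by ring]
      by_cases hbig : hi + 1 < i
      · simp only [innerA, if_pos hbig]
        rw [if_neg (by rintro ⟨_, hle, _, hub, _⟩; omega)]
      · by_cases hmul : i * (hi + 1) = n
        · have hq : n / i = hi + 1 := by
            rw [← hmul]; exact Int.mul_ediv_cancel_left _ (by omega)
          have hdvd : i ∣ n := ⟨hi + 1, hmul.symm⟩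
          by_cases hupd : i - (hi + 1) < f1 - f2 ∨ f1 = 0
          · simp only [innerA, if_neg hbig, if_pos hmul, if_pos hupd]
            rw [IH, if_neg (by rintro ⟨_, _, _, hub, _⟩; omega),
                if_pos ⟨hdvd, by omega, by omega, by omega, by rw [hq]; exact hupd⟩, hq]
          · simp only [innerA, if_neg hbig, if_pos hmul, if_neg hupd]
            rw [IH, if_neg (by rintro ⟨_, _, _, hub, _⟩; omega),
                if_neg (by rintro ⟨_, _, _, _, h5⟩; rw [hq] at h5; exact hupd h5)]
        · simp only [innerA, if_neg hbig, if_neg hmul]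
          rw [IH]
          by_cases hdvd : i ∣ n
          · have hne : n / i ≠ hi + 1 := by
              intro h
              exact hmul (by rw [← h]; exact Int.mul_ediv_cancel' hdvd)
            refine if_congr ?_ rfl rfl
            constructor
            · rintro ⟨a, b, c, d, e⟩; exact ⟨a, b, c, by omega, e⟩
            · rintro ⟨a, b, c, d, e⟩; exact ⟨a, b, c, by omega, e⟩
          · rw [if_neg (fun h => hdvd h.1), if_neg (fun h => hdvd h.1)]

-- characterisation of B's trial-division loop
lemma altLoop_eq {n : Int} (hn : 6 ≤ n) :
    ∀ (d : Int) (hd : 2 ≤ d), (∀ e : Int, 2 ≤ e → e < d → ¬ e ∣ n) →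
      altLoop n d hd = if pFac n * pFac n ≤ n then (pFac n, n / pFac n) else (0, 0) := by
  have hp2 := pFac_two_le hn
  have hpd := pFac_dvd hn
  suffices H : ∀ k : Nat, ∀ (d : Int) (hd : 2 ≤ d), (n + 1 - d).toNat ≤ k →
      (∀ e : Int, 2 ≤ e → e < d → ¬ e ∣ n) →
      altLoop n d hd = if pFac n * pFac n ≤ n then (pFac n, n / pFac n) else (0, 0) by
    intro d hd hmin; exact H (n + 1 - d).toNat d hd le_rfl hmin
  intro k
  induction k with
  | zero =>
      intro d hd hk hmin
      exfalso
      have hple : pFac n ≤ n := Int.le_of_dvd (by omega) hpd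
      exact hmin (pFac n) hp2 (by omega) hpd
  | succ k IH =>
      intro d hd hk hmin
      rw [altLoop]
      by_cases h1 : d * d ≤ n
      · rw [dif_pos h1]
        by_cases h2 : PySem.Int.mod n d = 0
        · rw [if_pos h2]
          have hdvd : d ∣ n := (PySem.Int.mod_eq_zero_iff_dvd n d).mp h2
          have hdp : d = pFac n := by
            have h3 : pFac n ≤ d := pFac_min hn hd hdvd
            by_contra hne
            exact hmin (pFac n) hp2 (by omega) hpd
          rw [if_pos (by rw [← hdp]; exact h1), ← hdp,
              PySem.Int.floordiv_eq_ediv_of_pos (by omega : (0:Int) < d)]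
        · rw [if_neg h2]
          have hnd : ¬ d ∣ n := fun hdvd => h2 ((PySem.Int.mod_eq_zero_iff_dvd n d).mpr hdvd)
          have hdn : d ≤ n := by nlinarith
          refine IH (d + 1) (by omega) (by omega) ?_
          intro e he hlt
          rcases lt_or_eq_of_le (by omega : e ≤ d) with h | h
          · exact hmin e he h
          · rw [h]; exact hnd
      · rw [dif_neg h1]
        rw [if_neg]
        intro hsq
        have h3 : ¬ d ≤ pFac n := by
          intro hle
          exact h1 (le_trans (by nlinarith) hsq)
        exact hmin (pFac n) hp2 (by omega) hpd

-- the main case n ≥ 6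
lemma big_case {n : Int} (hn : 6 ≤ n) :
    get_smallest_factors n = get_smallest_factors_alt n := by
  have hp2 := pFac_two_le hn
  have hpd := pFac_dvd hn
  set p := pFac n with hpdef
  have hb : Int.tdiv (n + 2) 2 = (n + 2) / 2 := by
    rw [Int.tdiv_eq_ediv, if_pos (Or.inl (by omega))]; ring
  have hb4 : (4 : Int) ≤ (n + 2) / 2 := by omega
  have hB : get_smallest_factors_alt n =
      if p * p ≤ n then (p, n / p) else (0, 0) := by
    unfold get_smallest_factors_alt
    exact altLoop_eq hn 2 (by norm_num) (fun e he hlt => absurd (lt_of_le_of_lt he hlt) (lt_irrefl 2))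
  unfold get_smallest_factors
  rw [hb, hB]
  by_cases hsq : p * p ≤ n
  · -- A finds (p, n/p)
    have hq := Int.mul_ediv_cancel' hpd
    set q := n / p with hqdef
    have hpq : p ≤ q := (Int.le_ediv_iff_mul_le (by omega)).mpr hsq
    have hq3 : 3 ≤ q := by nlinarith
    have hqb : q ≤ (n + 2) / 2 - 1 := by
      have h2q : q * 2 ≤ n := by nlinarith
      have : q ≤ n / 2 := (Int.le_ediv_iff_mul_le (by omega)).mpr h2q
      omega
    have hpb : p < (n + 2) / 2 := by omega
    rw [PySem.List.pyRange_one_append 2 p ((n + 2) / 2) (by omega) (by omega),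
        List.foldl_append]
    have hseg1 : (PySem.List.pyRange 2 p).foldl
        (fun st i => innerA i n (PySem.List.pyRange ((n + 2) / 2) 2 (-1)) st) (0, 0) = (0, 0) := by
      apply foldl_fixed
      intro x hx
      rw [PySem.List.mem_pyRange_one] at hx
      rw [innerA_spec n x hn (by omega) _ (by omega)]
      rw [if_neg]
      rintro ⟨hdvd, _, _, _, _⟩
      have := pFac_min hn (by omega : 2 ≤ x) hdvd
      omega
    rw [hseg1, PySem.List.pyRange_one_cons hpb, List.foldl_cons]
    have hstep : innerA p n (PySem.List.pyRange ((n + 2) / 2) 2 (-1)) (0, 0) = (p, q) := by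
      rw [innerA_spec n p hn hp2 _ (by omega),
          if_pos ⟨hpd, hpq, hq3, by omega, Or.inr rfl⟩]
    rw [hstep, if_pos hsq]
    apply foldl_fixed
    intro x hx
    rw [PySem.List.mem_pyRange_one] at hx
    rw [innerA_spec n x hn (by omega) _ (by omega)]
    rw [if_neg]
    rintro ⟨hdvd, hile, _, _, hupd⟩
    have hr := Int.mul_ediv_cancel' hdvd
    set r := n / x with hrdef
    have hrx : x ≤ r := hile
    have hrpos : 0 < r := by omega
    have hrq : r < q := by nlinarith
    rcases hupd with h | h
    · omega
    · omega
  · -- no factor pair at all: A never updates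
    rw [if_neg hsq, foldl_fixed _ _ _ ?_]
    intro x hx
    rw [PySem.List.mem_pyRange_one] at hx
    rw [innerA_spec n x hn (by omega) _ (by omega)]
    rw [if_neg]
    rintro ⟨hdvd, hile, _, _, _⟩
    have hpx := pFac_min hn (by omega : 2 ≤ x) hdvd
    have hxx : x * x ≤ n := by
      have := Int.mul_ediv_cancel' hdvd
      nlinarith
    exact hsq (by nlinarith)

lemma small_case {n : Int} (hlo : -2147483648 ≤ n) (hhi : n ≤ 3) :
    get_smallest_factors n = get_smallest_factors_alt n := by
  have hb : Int.tdiv (n + 2) 2 ≤ 2 := by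
    rw [Int.tdiv_eq_ediv]
    rcases em (0 ≤ n + 2 ∨ 2 ∣ n + 2) with h | h
    · rw [if_pos h]; omega
    · rw [if_neg h]
      have h2 : ¬ 0 ≤ n + 2 := fun hc => h (Or.inl hc)
      rw [show (2:Int).sign = 1 from rfl]
      omega
  have hA : get_smallest_factors n = (0, 0) := by
    unfold get_smallest_factors
    rw [PySem.List.pyRange_one_eq_nil hb]
    rfl
  have hB : get_smallest_factors_alt n = (0, 0) := by
    unfold get_smallest_factors_alt
    rw [altLoop]
    rw [dif_neg (by omega : ¬ (2:Int) * 2 ≤ n)]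
  rw [hA, hB]

lemma five_case : get_smallest_factors 5 = get_smallest_factors_alt 5 := by
  have hB : get_smallest_factors_alt 5 = (0, 0) := by
    unfold get_smallest_factors_alt
    rw [altLoop]
    rw [dif_pos (by norm_num : (2:Int) * 2 ≤ 5),
        if_neg (by decide : ¬ PySem.Int.mod 5 2 = 0)]
    rw [altLoop]
    rw [dif_neg (by norm_num : ¬ ((2:Int) + 1) * (2 + 1) ≤ 5)]
  rw [hB]
  decide

lemma altB_four : get_smallest_factors_alt 4 = (2, 2) := by
  unfold get_smallest_factors_alt
  rw [altLoop]
  rw [dif_pos (by norm_num : (2:Int) * 2 ≤ 4),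
      if_pos (by decide : PySem.Int.mod 4 2 = 0)]
  decide

-- ===== VERDICT (by name: the statement is the Claim_ definition above) =====
theorem get_smallest_factors_spec : Claim_unchanged_get_smallest_factors := by
  intro n hdom hD
  have hdom' : -2147483648 ≤ n ∧ n ≤ 2147483648 := by
    have := hdom
    unfold Dom_get_smallest_factors pvDomInt at this
    exact of_decide_eq_true this
  rcases (by omega : n ≤ 3 ∨ 3 < n) with h3 | h3
  · exact small_case hdom'.1 h3
  · rcases (by omega : n < 6 ∨ 6 ≤ n) with h6 | h6
    · interval_cases n
      · exact absurd (by decide : D_get_smallest_factors 4) hD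
      · exact five_case
    · exact big_case h6

theorem get_smallest_factors_changed : Claim_changed_get_smallest_factors := by
  unfold Claim_changed_get_smallest_factors
  refine ⟨by decide, by decide, by decide, ?_, by decide⟩
  exact altB_four

theorem get_smallest_factors_tight : Claim_exact_get_smallest_factors := by
  intro n _ hD
  unfold D_get_smallest_factors at hD
  subst hD
  rw [altB_four]
  decide
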